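-- pv_equiv track=rewrite | github.com/manwaner333/Learning-Flux-Diffusion-Functions-Convection-Diffusion-Equations | beta_300_case_1_N_200_no_abs_0.5_obs_3/aTEAM/nn/modules/Interpolation.py | _less_order_m
-- ===== SOURCE A (Python) =====
-- def _less_order_m(d,m):
--     A = []
--     for k in range(m+1):
--         B = _inv_equal_order_m(d,k)
--         for b in B:
--             b.reverse()
--         B.sort()
--         B.reverse()
--         A.append(B)
--     return A
--
-- def _inv_equal_order_m(d,m):
--     A = []
--     assert d >= 1 and m >= 0
--     if d == 1:
--         A = [[m,],]
--         return A
--     if m == 0: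
--         for i in range(d):
--             A.append(0)
--         return [A,]
--     for k in range(m+1):
--         B = _inv_equal_order_m(d-1,m-k)
--         for b in B:
--             b.append(k)
--         A = A+B
--     return A
-- ===== SOURCE B (Python) =====
-- def _desc_equal(d, k):
--     # all d-tuples of nonnegative ints summing to k, in descending lexicographic order
--     assert d >= 1
--     if k == 0:
--         return [[0] * d]
--     if d == 1:
--         return [[k]]
--     out = []
--     for i in range(k, -1, -1):
--         for tail in _desc_equal(d - 1, k - i):
--             out.append([i] + tail)
--     return out
--
-- def _less_order_m(d, m):
--     return [_desc_equal(d, k) for k in range(m + 1)]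
-- ===== Notes on version B (the rewrite author's own statement) =====
-- stated objective: simpler
-- what changed: B generates each order-k group directly in descending lexicographic order (first coordinate counted downward, recursing on the remaining dimensions), eliminating A's per-group elementwise reverse, sort and reverse passes.
-- outside the precondition, e.g. on _less_order_m(0, 0): A raises AssertionError, B raises AssertionError
import Mathlib
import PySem

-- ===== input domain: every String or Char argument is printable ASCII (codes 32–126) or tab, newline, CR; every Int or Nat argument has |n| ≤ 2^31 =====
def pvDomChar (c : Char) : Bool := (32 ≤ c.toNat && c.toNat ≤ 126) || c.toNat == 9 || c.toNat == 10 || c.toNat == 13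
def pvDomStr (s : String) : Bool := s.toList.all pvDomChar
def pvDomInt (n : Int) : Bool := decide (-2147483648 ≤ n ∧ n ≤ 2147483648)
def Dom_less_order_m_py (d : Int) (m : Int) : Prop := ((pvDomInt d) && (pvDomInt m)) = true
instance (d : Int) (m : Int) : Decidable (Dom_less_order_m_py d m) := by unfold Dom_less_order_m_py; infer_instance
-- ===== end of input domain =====

-- B replaces A's recursive enumeration + per-group reverse/sort/reverse by a direct recursive
-- generation of each order group in descending lexicographic order (no sorting at all): simpler.

-- ===== PORT A =====
-- port of _inv_equal_order_m; where the Python assert fails (d < 1 or m < 0) the port returns []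
-- (those inputs are excluded by Pre_less_order_m_py)
def pyInvEqualOrderM (d : Int) (m : Int) : List (List Int) :=
  if h : 1 ≤ d ∧ 0 ≤ m then
    if hd : d = 1 then [[m]]
    else if hm : m = 0 then
      [(PySem.List.pyRange 0 d 1).foldl (fun A _ => A ++ [(0 : Int)]) []]
    else
      ((PySem.List.pyRange 0 (m+1) 1).attach).foldl
        (fun A kh => A ++ (pyInvEqualOrderM (d-1) (m - kh.1)).map (fun b => b ++ [kh.1])) []
  else []
termination_by (d + m).toNat
decreasing_by
  have hk := PySem.List.mem_pyRange_one.mp kh.2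
  omega

def less_order_m_py (d : Int) (m : Int) : List (List (List Int)) :=
  (PySem.List.pyRange 0 (m+1) 1).foldl
    (fun A k =>
      A ++ [(PySem.List.sorted ((pyInvEqualOrderM d k).map List.reverse) (fun x => x) false).reverse])
    []

-- ===== PORT B =====
-- port of _desc_equal; where the Python assert fails (d < 1) the port returns []
def descEqual (d : Int) (k : Int) : List (List Int) :=
  if h : 1 ≤ d then
    if hk : k = 0 then [List.replicate d.toNat 0]
    else if hd : d = 1 then [[k]]
    else
      ((PySem.List.pyRange k (-1) (-1)).attach).foldl
        (fun out ih => out ++ (descEqual (d-1) (k - ih.1)).map (fun t => ih.1 :: t)) []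
  else []
termination_by d.toNat + k.toNat
decreasing_by
  have hi := PySem.List.mem_pyRange_neg_one.mp ih.2
  omega

def less_order_m_py_alt (d : Int) (m : Int) : List (List (List Int)) :=
  (PySem.List.pyRange 0 (m+1) 1).map (fun k => descEqual d k)

-- ===== PRECONDITION & SPEC =====
-- Pre_ excludes exactly the inputs (d < 1 with m ≥ 0) on which A raises AssertionError.
def Pre_less_order_m_py (d : Int) (m : Int) : Prop := 1 ≤ d ∨ m < 0
instance (d : Int) (m : Int) : Decidable (Pre_less_order_m_py d m) := by unfold Pre_less_order_m_py; infer_instance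

def pvWitness_less_order_m_py : Int × Int := (2, 3)

def Spec_less_order_m_py (d : Int) (m : Int) (out : List (List (List Int))) : Prop := out = less_order_m_py_alt d m
instance (d : Int) (m : Int) (out : List (List (List Int))) : Decidable (Spec_less_order_m_py d m out) := by unfold Spec_less_order_m_py; infer_instance

-- ===== CLAIM (what is proved, stated in full; the proofs are below) =====
def Claim_equal_less_order_m_py : Prop := ∀ (d : Int) (m : Int), Dom_less_order_m_py d m → Pre_less_order_m_py d m → Spec_less_order_m_py d m (less_order_m_py d m)

-- ===== LEMMAS AND PROOFS =====

-- foldl with "acc ++ block x" is acc ++ flatMap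
theorem pv_foldl_append_blocks {α β : Type} (g : α → List β) :
    ∀ (l : List α) (acc : List β),
      l.foldl (fun A x => A ++ g x) acc = acc ++ l.flatMap g := by
  intro l
  induction l with
  | nil => intro acc; simp
  | cons x l ih => intro acc; simp [List.foldl_cons, ih]

-- attach version, landing directly in flatMap over the plain list
theorem pv_foldl_attach_append_blocks {α β : Type} (l : List α) (g : α → List β) :
    l.attach.foldl (fun A x => A ++ g x.1) [] = l.flatMap g := by
  rw [pv_foldl_append_blocks]
  simp [List.flatMap_def]

theorem pv_flatMap_single {α β : Type} (l : List α) (f : α → β) :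
    (l.flatMap fun x => [f x]) = l.map f := by
  induction l <;> simp_all

theorem pv_flatMap_perm_of_mem {α β : Type} (l : List α) (f g : α → List β)
    (h : ∀ x ∈ l, (f x).Perm (g x)) : (l.flatMap f).Perm (l.flatMap g) := by
  induction l with
  | nil => simp
  | cons x l ih =>
      simp only [List.flatMap_cons]
      exact (h x (by simp)).append (ih (fun y hy => h y (by simp [hy])))

theorem pv_reverse_flatMap_perm {α β : Type} (l : List α) (f : α → List β) :
    (l.reverse.flatMap f).Perm (l.flatMap f) := by
  induction l with
  | nil => simp
  | cons x l ih =>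
      simp only [List.reverse_cons, List.flatMap_append, List.flatMap_cons, List.flatMap_nil,
        List.append_nil]
      exact (ih.append_right _).trans List.perm_append_comm

-- unfolding equations in flatMap form
theorem pyInvEqualOrderM_eq (d m : Int) (h1 : 1 ≤ d) (hd : d ≠ 1) (h0 : 0 ≤ m) (hm : m ≠ 0) :
    pyInvEqualOrderM d m =
      (PySem.List.pyRange 0 (m+1) 1).flatMap
        (fun k => (pyInvEqualOrderM (d-1) (m-k)).map (fun b => b ++ [k])) := by
  rw [pyInvEqualOrderM]
  simp only [dif_pos (And.intro h1 h0), dif_neg hd, dif_neg hm]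
  exact pv_foldl_attach_append_blocks (PySem.List.pyRange 0 (m+1) 1)
    (fun k => (pyInvEqualOrderM (d-1) (m-k)).map (fun b => b ++ [k]))

theorem descEqual_eq (d k : Int) (h1 : 1 ≤ d) (hk : k ≠ 0) (hd : d ≠ 1) :
    descEqual d k =
      (PySem.List.pyRange k (-1) (-1)).flatMap
        (fun i => (descEqual (d-1) (k-i)).map (fun t => i :: t)) := by
  rw [descEqual]
  simp only [dif_pos h1, dif_neg hk, dif_neg hd]
  exact pv_foldl_attach_append_blocks (PySem.List.pyRange k (-1) (-1))
    (fun i => (descEqual (d-1) (k-i)).map (fun t => i :: t))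

-- the m = 0 group is the single all-zero multi-index, on both sides
theorem pv_foldl_append_zeros (l : List Int) (acc : List Int) :
    l.foldl (fun A _ => A ++ [(0 : Int)]) acc = acc ++ List.replicate l.length 0 := by
  induction l generalizing acc with
  | nil => simp
  | cons x l ih => simp [List.foldl_cons, ih, List.replicate_succ]

theorem pyInvEqualOrderM_zero (d : Int) (h1 : 1 ≤ d) :
    pyInvEqualOrderM d 0 = [List.replicate d.toNat 0] := by
  rw [pyInvEqualOrderM]
  rcases eq_or_ne d 1 with hd | hd
  · subst hd; simp
  · simp only [dif_pos (And.intro h1 le_rfl), dif_neg hd]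
    rw [pv_foldl_append_zeros]
    simp [PySem.List.length_pyRange_one]

theorem descEqual_zero (d : Int) (h1 : 1 ≤ d) :
    descEqual d 0 = [List.replicate d.toNat 0] := by
  rw [descEqual]
  simp [h1]

-- descEqual is strictly decreasing in lexicographic order
theorem descEqual_pairwise : ∀ (n : Nat) (d k : Int), d.toNat = n → 1 ≤ d → 0 ≤ k →
    (descEqual d k).Pairwise (fun a b : List Int => b < a) := by
  intro n
  induction n using Nat.strong_induction_on with
  | _ n IH =>
    intro d k hn h1 hk
    rcases eq_or_ne k 0 with hk0 | hk0
    · subst hk0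
      rw [descEqual_zero d h1]
      simp
    rcases eq_or_ne d 1 with hd | hd
    · subst hd; rw [descEqual]; simp [hk0]
    · rw [descEqual_eq d k h1 hk0 hd, List.flatMap_def, List.pairwise_flatten]
      constructor
      · intro l hl
        rcases List.mem_map.mp hl with ⟨i, hi, rfl⟩
        have hir := PySem.List.mem_pyRange_neg_one.mp hi
        rw [List.pairwise_map]
        have hrec := IH (d-1).toNat (by omega) (d-1) (k-i) rfl (by omega) (by omega)
        exact hrec.imp (fun h => by
          rw [List.cons_lt_cons_iff]
          exact Or.inr ⟨rfl, h⟩)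
      · rw [List.pairwise_map]
        have hdec : (PySem.List.pyRange k (-1) (-1)).Pairwise (fun i j : Int => j < i) := by
          rw [PySem.List.pyRange_neg_one_eq_reverse, List.pairwise_reverse]
          exact PySem.List.pairwise_lt_pyRange_one _ _
        exact hdec.imp (fun {i j} hij => by
          intro x hx y hy
          rcases List.mem_map.mp hx with ⟨a, _, rfl⟩
          rcases List.mem_map.mp hy with ⟨b, _, rfl⟩
          rw [List.cons_lt_cons_iff]
          exact Or.inl hij)

-- A's group (elementwise reversed) is a permutation of B's group
theorem pv_perm_main : ∀ (n : Nat) (d m : Int), (d + m).toNat = n → 1 ≤ d → 0 ≤ m →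
    ((pyInvEqualOrderM d m).map List.reverse).Perm (descEqual d m) := by
  intro n
  induction n using Nat.strong_induction_on with
  | _ n IH =>
    intro d m hn h1 hm
    rcases eq_or_ne m 0 with hm0 | hm0
    · subst hm0
      rw [pyInvEqualOrderM_zero d h1, descEqual_zero d h1]
      simp [List.reverse_replicate]
    rcases eq_or_ne d 1 with hd | hd
    · subst hd
      rw [pyInvEqualOrderM, descEqual]
      simp [hm, hm0]
    · rw [pyInvEqualOrderM_eq d m h1 hd hm hm0, descEqual_eq d m h1 hm0 hd]
      rw [List.map_flatMap]
      have hstep : ∀ k : Int,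
          (fun a => List.reverse a) ∘ (fun b => b ++ [k]) = (fun b : List Int => k :: b.reverse) := by
        intro k; funext b; simp
      have h2 : ((PySem.List.pyRange 0 (m+1) 1).flatMap
            (fun k => ((pyInvEqualOrderM (d-1) (m-k)).map (fun b => b ++ [k])).map List.reverse)).Perm
          ((PySem.List.pyRange 0 (m+1) 1).flatMap
            (fun k => (descEqual (d-1) (m-k)).map (fun t => k :: t))) := by
        apply pv_flatMap_perm_of_mem
        intro k hkmem
        have hkr := PySem.List.mem_pyRange_one.mp hkmem
        rw [List.map_map, hstep k]
        have : (fun b : List Int => k :: b.reverse) = (fun t : List Int => k :: t) ∘ List.reverse := by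
          funext b; simp
        rw [this, ← List.map_map]
        exact (IH (d-1 + (m-k)).toNat (by omega) (d-1) (m-k) rfl (by omega) (by omega)).map _
      refine h2.trans ?_
      rw [PySem.List.pyRange_neg_one_eq_reverse]
      have h0 : (-1 : Int) + 1 = 0 := by ring
      rw [h0]
      exact (pv_reverse_flatMap_perm _ _).symm

-- per-order group: A's reverse/sort/reverse equals B's direct descending generation
theorem pv_block_eq (d k : Int) (h1 : 1 ≤ d) (hk : 0 ≤ k) :
    (PySem.List.sorted ((pyInvEqualOrderM d k).map List.reverse) (fun x => x) false).reverse =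
      descEqual d k := by
  have hperm := pv_perm_main (d + k).toNat d k rfl h1 hk
  have hpw := descEqual_pairwise d.toNat d k rfl h1 hk
  have hs : PySem.List.sorted ((pyInvEqualOrderM d k).map List.reverse) (fun x => x) false =
      (descEqual d k).reverse := by
    rw [Subsingleton.elim ((fun a b => a.decidableLT b) : DecidableLT (List Int))
      (LinearOrder.toDecidableLT : DecidableLT (List Int))]
    exact PySem.List.sorted_eq_of_perm_of_pairwise_lt _ _ (fun x => x)
      (((descEqual d k).reverse_perm).trans hperm.symm)
      (List.pairwise_reverse.mpr hpw)
  rw [hs, List.reverse_reverse]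

-- ===== VERDICT (by name: the statement is the Claim_ definition above) =====
theorem less_order_m_py_spec : Claim_equal_less_order_m_py := by
  intro d m _ hpre
  unfold Spec_less_order_m_py less_order_m_py less_order_m_py_alt
  rw [pv_foldl_append_blocks]
  rw [List.nil_append]
  by_cases h1 : 1 ≤ d
  · rw [pv_flatMap_single]
    apply List.map_congr_left
    intro k hkmem
    have hkr := PySem.List.mem_pyRange_one.mp hkmem
    rw [pv_block_eq d k h1 (by omega)]
  · have hm : m < 0 := by
      rcases hpre with h | h
      · omega
      · exact h
    rw [PySem.List.pyRange_one_eq_nil (by omega)]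
    simp
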